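-- pv_equiv track=rewrite | github.com/extinctsion/lyrchel_number | lychrel_using_196_algo.py | lychrel_test
-- ===== SOURCE A (Python) =====
-- def is_palindrome(n):
--     original = n
--     reversed_n = 0
--     while n > 0:
--         reversed_n = reversed_n * 10 + n % 10
--         n //= 10
--     return original == reversed_n
--
-- def reverse_number(n):
--     reversed_n = 0
--     while n > 0:
--         reversed_n = reversed_n * 10 + n % 10
--         n //= 10
--     return reversed_n
--
-- def lychrel_test(n, max_iterations=500):
--     iteration = 0
--     while iteration < max_iterations:
--         reversed_n = reverse_number(n)  # Reverse the digits of the number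
--         n += reversed_n
--         iteration += 1
--
--         if is_palindrome(n):
--             return False, n, iteration  # Not a Lychrel number, palindrome found
--
--     return True, n, iteration  # Possible Lychrel number (no palindrome found)
-- ===== SOURCE B (Python) =====
-- def _to_int(digits):
--     value = 0
--     for d in digits:
--         value = value * 10 + d
--     return value
--
--
-- def _add_reverse(digits):
--     # digit-wise reverse-and-add: each column pairs a digit with its mirror,
--     # then one carry pass runs from the least significant end
--     columns = [a + b for a, b in zip(digits, reversed(digits))]
--     carry = 0
--     out = []
--     for s in reversed(columns):
--         carry, d = divmod(s + carry, 10)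
--         out.append(d)
--     if carry:
--         out.append(carry)
--     return out[::-1]
--
--
-- def lychrel_test(n, max_iterations=500):
--     digits = [int(c) for c in str(n)]  # decimal digits, most significant first
--     iteration = 0
--     while iteration < max_iterations:
--         digits = _add_reverse(digits)
--         iteration += 1
--         if digits == digits[::-1]:
--             return False, _to_int(digits), iteration
--     return True, _to_int(digits), iteration
-- ===== Notes on version B (the rewrite author's own statement) =====
-- stated objective: alternative
-- what changed: B represents the number as a list of decimal digits and performs the reverse-and-add step by pairing each digit with its mirror and running an explicit carry pass, testing the palindrome as digit-list symmetry, instead of A's integer arithmetic reversal loops; Pre_ excludes negative n, where A's digit loops fall through (returning n unchanged) while B's digit-list parse of str(n) raises ValueError on the sign character.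
-- outside the precondition, e.g. on lychrel_test(-5, 3): A returns (True, -5, 3), B raises ValueError
import Mathlib
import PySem

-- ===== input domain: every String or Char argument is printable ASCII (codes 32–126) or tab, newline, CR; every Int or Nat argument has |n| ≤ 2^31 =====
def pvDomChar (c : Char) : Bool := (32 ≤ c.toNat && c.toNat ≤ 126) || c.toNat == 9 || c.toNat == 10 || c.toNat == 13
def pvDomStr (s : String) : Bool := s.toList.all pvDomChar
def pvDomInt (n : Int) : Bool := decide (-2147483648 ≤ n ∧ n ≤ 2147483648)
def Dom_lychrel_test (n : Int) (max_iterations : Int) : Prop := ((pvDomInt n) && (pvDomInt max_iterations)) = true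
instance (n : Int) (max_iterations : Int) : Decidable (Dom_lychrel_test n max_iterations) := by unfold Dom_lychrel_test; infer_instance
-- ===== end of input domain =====

-- B keeps the number as a list of decimal digits: the reverse-and-add step pairs each digit with
-- its mirror and runs one explicit carry pass, and the palindrome test is digit-list symmetry
-- (objective: alternative; A computes with whole integers via two arithmetic reversal loops).

-- ===== PORT A =====
-- the shared body of A's two identical `while n > 0` loops (is_palindrome / reverse_number)
def pyRevNumLoop (n reversed_n : Int) : Int :=
  if 0 < n then
    pyRevNumLoop (PySem.Int.floordiv n 10) (reversed_n * 10 + PySem.Int.mod n 10)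
  else reversed_n
termination_by n.toNat
decreasing_by
  rename_i h
  rw [PySem.Int.floordiv_eq_ediv_of_pos (by norm_num : (0:Int) < 10)]
  omega

def is_palindrome (n : Int) : Bool := n == pyRevNumLoop n 0

def reverse_number (n : Int) : Int := pyRevNumLoop n 0

def lychrelLoop (n iteration max_iterations : Int) : Bool × Int × Int :=
  if iteration < max_iterations then
    let reversed_n := reverse_number n
    let n' := n + reversed_n
    let iteration' := iteration + 1
    if is_palindrome n' then (false, n', iteration')
    else lychrelLoop n' iteration' max_iterations
  else (true, n, iteration)
termination_by (max_iterations - iteration).toNat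
decreasing_by omega

def lychrel_test (n : Int) (max_iterations : Int) : Bool × Int × Int :=
  lychrelLoop n 0 max_iterations

-- ===== PORT B =====
-- Source B's _to_int: value = 0; for d in digits: value = value * 10 + d
def to_int (digits : List Int) : Int := digits.foldl (fun v d => v * 10 + d) 0

-- Source B's _add_reverse: columns = [a+b for a,b in zip(digits, reversed(digits))]; then
-- for s in reversed(columns): carry, d = divmod(s + carry, 10); out.append(d);
-- if carry: out.append(carry); return out[::-1]  (out[::-1] is List.reverse).
def add_reverse (digits : List Int) : List Int :=
  let columns := (digits.zip digits.reverse).map (fun p => p.1 + p.2)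
  let st := columns.reverse.foldl
    (fun (st : Int × List Int) s =>
      let qr := (PySem.Int.divmod? (s + st.1) 10).getD (0, 0)
      (qr.1, st.2 ++ [qr.2])) (0, ([] : List Int))
  let out := if st.1 ≠ 0 then st.2 ++ [st.1] else st.2
  out.reverse

def lychrelAltLoop (digits : List Int) (iteration max_iterations : Int) : Bool × Int × Int :=
  if iteration < max_iterations then
    let digits' := add_reverse digits
    let iteration' := iteration + 1
    if digits' == digits'.reverse then (false, to_int digits', iteration')
    else lychrelAltLoop digits' iteration' max_iterations
  else (true, to_int digits, iteration)
termination_by (max_iterations - iteration).toNat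
decreasing_by omega

-- [int(c) for c in str(n)]: int(c) is PySem.Int.ofChars? [c]; inside Pre_ (0 ≤ n) every c is a
-- decimal digit, so the .getD 0 default is unreachable.
def lychrel_test_alt (n : Int) (max_iterations : Int) : Bool × Int × Int :=
  lychrelAltLoop ((PySem.Int.toChars n).map (fun c => (PySem.Int.ofChars? [c]).getD 0)) 0 max_iterations

-- ===== PRECONDITION & SPEC =====
-- Pre_ excludes negative n, on which A returns a value only by accident (its digit loops never run,
-- so n is re-added 0 forever) while B's per-character int() parse of str(n) raises ValueError on '-'.
def Pre_lychrel_test (n : Int) (max_iterations : Int) : Prop := 0 ≤ n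
instance (n : Int) (max_iterations : Int) : Decidable (Pre_lychrel_test n max_iterations) := by unfold Pre_lychrel_test; infer_instance

def pvWitness_lychrel_test : Int × Int := (196, 5)

def Spec_lychrel_test (n : Int) (max_iterations : Int) (out : Bool × Int × Int) : Prop := out = lychrel_test_alt n max_iterations
instance (n : Int) (max_iterations : Int) (out : Bool × Int × Int) : Decidable (Spec_lychrel_test n max_iterations out) := by unfold Spec_lychrel_test; infer_instance

-- ===== CLAIM (what is proved, stated in full; the proofs are below) =====
def Claim_equal_lychrel_test : Prop := ∀ (n : Int) (max_iterations : Int), Dom_lychrel_test n max_iterations → Pre_lychrel_test n max_iterations → Spec_lychrel_test n max_iterations (lychrel_test n max_iterations)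

-- ===== LEMMAS AND PROOFS =====

-- proof-side abbreviations
def castL (L : List Nat) : List Int := L.map (fun d => Int.ofNat d)

-- the canonical digit list (most significant first) of a nonnegative integer, as B maintains it
def dRep (m : Nat) : List Int := if m = 0 then [0] else (castL (Nat.digits 10 m)).reverse

-- value of a least-significant-first digit list
def valLSF (l : List Int) : Int := l.foldr (fun d v => d + 10 * v) 0

-- the reversed digits of m, as a number
def revNat (m : Nat) : Nat := Nat.ofDigits 10 (Nat.digits 10 m).reverse

-- functional form of Source B's carry pass (least significant first)
def carrySpec : List Int → Int → Int × List Int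
  | [], c => (c, [])
  | s :: C, c =>
    let st := carrySpec C (PySem.Int.floordiv (s + c) 10)
    (st.1, PySem.Int.mod (s + c) 10 :: st.2)

-- ===== A-side characterisation =====

theorem pyRevNumLoop_nonpos {n : Int} (h : ¬ 0 < n) (a : Int) : pyRevNumLoop n a = a := by
  rw [pyRevNumLoop]; simp [h]

theorem pyRevNumLoop_eq_ofDigits : ∀ (m : Nat), 0 < m → ∀ (a : Int),
    pyRevNumLoop (m : Int) a
      = a * 10 ^ (Nat.digits 10 m).length + ((Nat.ofDigits 10 (Nat.digits 10 m).reverse : ℕ) : Int) := by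
  intro m
  induction m using Nat.strong_induction_on with
  | _ m IH =>
    intro hm a
    rw [pyRevNumLoop]
    simp only [show (0:Int) < (m:Int) from by exact_mod_cast hm, if_pos]
    have hfd : PySem.Int.floordiv (m:Int) 10 = ((m / 10 : Nat) : Int) := by
      exact_mod_cast PySem.Int.floordiv_natCast m 10
    have hmd : PySem.Int.mod (m:Int) 10 = ((m % 10 : Nat) : Int) := by
      exact_mod_cast PySem.Int.mod_natCast m 10
    rw [hfd, hmd]
    have hdig : Nat.digits 10 m = m % 10 :: Nat.digits 10 (m / 10) :=
      Nat.digits_def' (by norm_num) hm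
    by_cases hq : m / 10 = 0
    · rw [hq]
      rw [pyRevNumLoop_nonpos (by norm_num) _]
      rw [hdig, hq]
      simp only [Nat.digits_zero, List.reverse_cons, List.reverse_nil, List.nil_append,
        List.length_cons, List.length_nil, Nat.ofDigits_singleton]
      push_cast
      ring
    · rw [IH (m / 10) (Nat.div_lt_self hm (by norm_num)) (Nat.pos_of_ne_zero hq)]
      rw [hdig]
      simp only [List.reverse_cons, List.length_cons]
      rw [Nat.ofDigits_append]
      simp only [Nat.ofDigits_singleton, List.length_reverse]
      push_cast
      ring

theorem pyRev_eq (m : Nat) : pyRevNumLoop (m : Int) 0 = ((revNat m : Nat) : Int) := by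
  by_cases hm : 0 < m
  · rw [pyRevNumLoop_eq_ofDigits m hm 0, revNat]; ring
  · have : m = 0 := by omega
    subst this
    rw [pyRevNumLoop_nonpos (by norm_num)]
    simp [revNat]

theorem digits_palindrome_iff {m : Nat} (hm : 0 < m) :
    (Nat.ofDigits 10 (Nat.digits 10 m).reverse : ℕ) = m ↔
      (Nat.digits 10 m).reverse = Nat.digits 10 m := by
  constructor
  · intro h
    have hne : Nat.digits 10 m ≠ [] := Nat.digits_ne_nil_iff_ne_zero.mpr (by omega)
    have hdig : Nat.digits 10 m = m % 10 :: Nat.digits 10 (m / 10) :=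
      Nat.digits_def' (by norm_num) hm
    by_cases h0 : m % 10 = 0
    · exfalso
      have hlt : ∀ d ∈ (Nat.digits 10 (m / 10)).reverse, d < 10 := fun d hd =>
        Nat.digits_lt_base (by norm_num) (by
          have := List.mem_reverse.mp hd
          rw [hdig]; exact List.mem_cons_of_mem _ this)
      have hofd : Nat.ofDigits 10 (Nat.digits 10 m).reverse
          = Nat.ofDigits 10 (Nat.digits 10 (m / 10)).reverse := by
        rw [hdig, h0, Nat.ofDigits_reverse_zero_cons]
      have hb1 : Nat.ofDigits 10 (Nat.digits 10 (m / 10)).reverse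
          < 10 ^ (Nat.digits 10 (m / 10)).length := by
        have := Nat.ofDigits_lt_base_pow_length (b := 10) (by norm_num) hlt
        simpa using this
      have hb2 : 10 ^ (Nat.digits 10 m).length ≤ 10 * m :=
        Nat.base_pow_length_digits_le 10 m (by norm_num) (by omega)
      rw [hdig] at hb2
      simp only [List.length_cons, pow_succ'] at hb2
      have hb3 : 10 ^ (Nat.digits 10 (m / 10)).length ≤ m := by
        exact Nat.le_of_mul_le_mul_left hb2 (by norm_num)
      omega
    · have hrevne : (Nat.digits 10 m).reverse ≠ [] := by simpa using hne
      have hlast : (Nat.digits 10 m).reverse.getLast hrevne ≠ 0 := by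
        rw [List.getLast_reverse]
        simp only [hdig, List.head_cons]
        exact h0
      have hd2 : Nat.digits 10 (Nat.ofDigits 10 (Nat.digits 10 m).reverse)
          = (Nat.digits 10 m).reverse :=
        Nat.digits_ofDigits 10 (by norm_num) _
          (fun d hd => Nat.digits_lt_base (by norm_num) (List.mem_reverse.mp hd))
          (fun _ => hlast)
      rw [h] at hd2
      exact hd2.symm
  · intro h; rw [h, Nat.ofDigits_digits]

-- ===== decimal string of n (initial digit list) =====

theorem toDigitsCore_eq : ∀ (f m : Nat) (ds : List Char), 0 < m → m < 10 ^ f →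
    Nat.toDigitsCore 10 f m ds = ((Nat.digits 10 m).map Nat.digitChar).reverse ++ ds := by
  intro f
  induction f with
  | zero => intro m ds hm hf; simp at hf; omega
  | succ f IH =>
    intro m ds hm hf
    rw [Nat.toDigitsCore]
    have hdig : Nat.digits 10 m = m % 10 :: Nat.digits 10 (m / 10) :=
      Nat.digits_def' (by norm_num) hm
    by_cases hq : m / 10 = 0
    · simp only [hq]
      rw [hdig, hq]
      simp
    · simp only [hq, if_false]
      rw [IH (m / 10) _ (Nat.pos_of_ne_zero hq) (by
        have h : (10:ℕ) ^ (f+1) = 10 ^ f * 10 := by ring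
        omega)]
      rw [hdig]
      simp

theorem toChars_pos {n : Int} (h : 0 < n) :
    PySem.Int.toChars n = ((Nat.digits 10 n.toNat).map Nat.digitChar).reverse := by
  have hn : ¬ n < 0 := by omega
  have hm : 0 < n.toNat := by omega
  simp only [PySem.Int.toChars, hn, if_false, decide_false]
  rw [Nat.toDigits, toDigitsCore_eq (n.toNat + 1) n.toNat [] hm
    (lt_of_lt_of_le (Nat.lt_pow_self (by norm_num)) (Nat.pow_le_pow_right (by norm_num) (Nat.le_succ _)))]
  simp

theorem parse_digitChar {d : Nat} (h : d < 10) :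
    (PySem.Int.ofChars? [Nat.digitChar d]).getD 0 = (d : Int) := by
  interval_cases d <;> decide

theorem init_digits {n : Int} (h : 0 ≤ n) :
    (PySem.Int.toChars n).map (fun c => (PySem.Int.ofChars? [c]).getD 0) = dRep n.toNat := by
  by_cases h0 : n = 0
  · subst h0; decide
  · have hpos : 0 < n := by omega
    have hm : n.toNat ≠ 0 := by omega
    rw [toChars_pos hpos, List.map_reverse, List.map_map]
    simp only [dRep, hm, if_false]
    congr 1
    unfold castL
    refine List.map_congr_left (fun d hd => ?_)
    exact parse_digitChar (Nat.digits_lt_base (by norm_num) hd)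

-- ===== general list facts the B-side needs =====

theorem map_add_zip (xs ys : List Int) :
    (xs.zip ys).map (fun p => p.1 + p.2) = List.zipWith (· + ·) xs ys := by
  induction xs generalizing ys with
  | nil => simp
  | cons x xs IH => cases ys <;> simp [IH]

theorem zipWith_add_append (a b c d : List Int) (h : a.length = c.length) :
    List.zipWith (· + ·) (a ++ b) (c ++ d)
      = List.zipWith (· + ·) a c ++ List.zipWith (· + ·) b d := by
  induction a generalizing c with
  | nil => cases c with
    | nil => simp
    | cons _ _ => simp at h
  | cons x a IH => cases c with
    | nil => simp at h
    | cons y c =>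
      simp only [List.length_cons] at h
      simp [IH c (by omega)]

theorem reverse_zipWith_add (xs ys : List Int) (h : xs.length = ys.length) :
    (List.zipWith (· + ·) xs ys).reverse = List.zipWith (· + ·) xs.reverse ys.reverse := by
  induction xs generalizing ys with
  | nil => cases ys <;> simp
  | cons x xs IH =>
    cases ys with
    | nil => simp at h
    | cons y t =>
      simp only [List.length_cons] at h
      rw [List.zipWith_cons_cons, List.reverse_cons, List.reverse_cons, List.reverse_cons,
        zipWith_add_append _ _ _ _ (by simp; omega), IH t (by omega)]
      simp

theorem valLSF_append_singleton (l : List Int) (x : Int) :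
    valLSF (l ++ [x]) = valLSF l + x * 10 ^ l.length := by
  induction l with
  | nil => simp [valLSF]
  | cons d t IH => simp [valLSF] at IH ⊢; rw [IH]; ring

theorem valLSF_zipWith_add (xs ys : List Int) (h : xs.length = ys.length) :
    valLSF (List.zipWith (· + ·) xs ys) = valLSF xs + valLSF ys := by
  induction xs generalizing ys with
  | nil => cases ys with
    | nil => simp [valLSF]
    | cons y t => simp at h
  | cons x xs IH => cases ys with
    | nil => simp at h
    | cons y t =>
      simp only [List.length_cons] at h
      rw [List.zipWith_cons_cons]
      have h1 : ∀ (z : Int) (l : List Int), valLSF (z :: l) = z + 10 * valLSF l := fun _ _ => rfl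
      rw [h1, h1, h1, IH t (by omega)]
      ring

theorem valLSF_castL (L : List Nat) : valLSF (castL L) = ((Nat.ofDigits 10 L : Nat) : Int) := by
  induction L with
  | nil => simp [valLSF, castL]
  | cons d t IH =>
    have h1 : castL (d :: t) = Int.ofNat d :: castL t := rfl
    have h2 : valLSF (Int.ofNat d :: castL t) = Int.ofNat d + 10 * valLSF (castL t) := rfl
    rw [h1, h2, IH, Nat.ofDigits_cons, Int.ofNat_eq_natCast]
    push_cast
    ring

theorem to_int_horner (l : List Int) (v : Int) :
    l.foldl (fun v d => v * 10 + d) v = v * 10 ^ l.length + valLSF l.reverse := by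
  induction l generalizing v with
  | nil => simp [valLSF]
  | cons d t IH =>
    simp only [List.foldl_cons, List.reverse_cons, List.length_cons]
    rw [IH, valLSF_append_singleton]
    simp only [List.length_reverse]
    ring

theorem to_int_dRep (m : Nat) : to_int (dRep m) = (m : Int) := by
  by_cases hm : m = 0
  · subst hm; decide
  · simp only [dRep, hm, if_false, to_int]
    rw [to_int_horner, List.reverse_reverse, valLSF_castL, Nat.ofDigits_digits]
    ring

-- ===== the carry pass =====

theorem divmod_getD (a : Int) :
    (PySem.Int.divmod? a 10).getD (0, 0) = (PySem.Int.floordiv a 10, PySem.Int.mod a 10) := by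
  simp [PySem.Int.divmod?, PySem.Int.floordiv, PySem.Int.mod]

theorem foldl_carrySpec (C : List Int) (c : Int) (acc : List Int) :
    C.foldl (fun (st : Int × List Int) s =>
        let qr := (PySem.Int.divmod? (s + st.1) 10).getD (0, 0)
        (qr.1, st.2 ++ [qr.2])) (c, acc)
      = ((carrySpec C c).1, acc ++ (carrySpec C c).2) := by
  induction C generalizing c acc with
  | nil => simp [carrySpec]
  | cons s C IH =>
    simp only [divmod_getD] at IH ⊢
    rw [List.foldl_cons]
    rw [IH]
    simp [carrySpec]

theorem carrySpec_val (C : List Int) (c : Int) :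
    valLSF (carrySpec C c).2 + (carrySpec C c).1 * 10 ^ C.length = valLSF C + c := by
  induction C generalizing c with
  | nil => simp [carrySpec, valLSF]
  | cons s C IH =>
    have hfm := PySem.Int.floordiv_mul_add_mod (s + c) 10
    have h1 : carrySpec (s :: C) c
        = ((carrySpec C (PySem.Int.floordiv (s + c) 10)).1,
           PySem.Int.mod (s + c) 10 :: (carrySpec C (PySem.Int.floordiv (s + c) 10)).2) := rfl
    have h2 : ∀ (z : Int) (l : List Int), valLSF (z :: l) = z + 10 * valLSF l := fun _ _ => rfl
    have h3 := IH (PySem.Int.floordiv (s + c) 10)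
    rw [h1, h2, h2, List.length_cons, pow_succ]
    linear_combination 10 * h3 + hfm

theorem carrySpec_carry : ∀ (C : List Int), (∀ s ∈ C, 0 ≤ s ∧ s ≤ 18) →
    ∀ (c : Int), 0 ≤ c → c ≤ 1 → 0 ≤ (carrySpec C c).1 ∧ (carrySpec C c).1 ≤ 1 := by
  intro C
  induction C with
  | nil => intro _ c hc0 hc1; simp only [carrySpec]; omega
  | cons s C IH =>
    intro hC c hc0 hc1
    have hs := hC s List.mem_cons_self
    have hfd : PySem.Int.floordiv (s + c) 10 = (s + c) / 10 :=
      PySem.Int.floordiv_eq_ediv_of_pos (by norm_num)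
    have h1 : (carrySpec (s :: C) c).1 = (carrySpec C (PySem.Int.floordiv (s + c) 10)).1 := rfl
    rw [h1]
    exact IH (fun x hx => hC x (List.mem_cons_of_mem _ hx)) _
      (by rw [hfd]; omega) (by rw [hfd]; omega)

theorem carrySpec_digits : ∀ (C : List Int) (c : Int),
    ∀ d ∈ (carrySpec C c).2, 0 ≤ d ∧ d < 10 := by
  intro C
  induction C with
  | nil => intro c d hd; simp [carrySpec] at hd
  | cons s C IH =>
    intro c d hd
    have h1 : (carrySpec (s :: C) c).2
        = PySem.Int.mod (s + c) 10 :: (carrySpec C (PySem.Int.floordiv (s + c) 10)).2 := rfl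
    rw [h1] at hd
    rcases List.mem_cons.mp hd with h | h
    · subst h
      exact ⟨PySem.Int.mod_nonneg _ (by norm_num), PySem.Int.mod_lt _ (by norm_num)⟩
    · exact IH _ d h

theorem carrySpec_length (C : List Int) (c : Int) :
    (carrySpec C c).2.length = C.length := by
  induction C generalizing c with
  | nil => simp [carrySpec]
  | cons s C IH => simp [carrySpec, IH]

theorem carrySpec_last : ∀ (C : List Int), (∀ s ∈ C, 0 ≤ s) → ∀ (c : Int), 0 ≤ c →
    (carrySpec C c).1 = 0 → ∀ (t : Int), C.getLast? = some t → 1 ≤ t →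
      ∃ u, (carrySpec C c).2.getLast? = some u ∧ 1 ≤ u := by
  intro C
  induction C with
  | nil => intro _ c _ _ t ht _; simp at ht
  | cons s C IH =>
    intro hC c hc0 hcf t ht hts
    have hfd : PySem.Int.floordiv (s + c) 10 = (s + c) / 10 :=
      PySem.Int.floordiv_eq_ediv_of_pos (by norm_num)
    have hmd : PySem.Int.mod (s + c) 10 = (s + c) % 10 :=
      PySem.Int.mod_eq_emod_of_pos (by norm_num)
    have h2 : (carrySpec (s :: C) c).2
        = PySem.Int.mod (s + c) 10 :: (carrySpec C (PySem.Int.floordiv (s + c) 10)).2 := rfl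
    have h1 : (carrySpec (s :: C) c).1 = (carrySpec C (PySem.Int.floordiv (s + c) 10)).1 := rfl
    cases C with
    | nil =>
      have hst : s = t := by simpa using ht
      have hs1 : 1 ≤ s := by omega
      have hcf0 : (s + c) / 10 = 0 := by
        have h1 : (carrySpec [s] c).1 = PySem.Int.floordiv (s + c) 10 := rfl
        rw [h1, hfd] at hcf
        exact hcf
      refine ⟨PySem.Int.mod (s + c) 10, by simp [h2, carrySpec], ?_⟩
      rw [hmd]
      omega
    | cons s' C' =>
      have hrest := IH (fun x hx => hC x (List.mem_cons_of_mem _ hx))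
        (PySem.Int.floordiv (s + c) 10)
        (by rw [hfd]; have := hC s List.mem_cons_self; omega)
        (by rw [← h1]; exact hcf) t (by rw [← ht]; simp) hts
      obtain ⟨u, hu, hu1⟩ := hrest
      refine ⟨u, ?_, hu1⟩
      rw [h2]
      rw [List.getLast?_cons, hu]
      simp [Option.or]

-- ===== the step lemma =====

theorem castL_reverse (L : List Nat) : castL L.reverse = (castL L).reverse := by
  unfold castL
  simp

theorem toNat_castL (M : List Nat) : (castL M).map Int.toNat = M := by
  induction M with
  | nil => rfl
  | cons d T IH =>
    have h1 : castL (d :: T) = Int.ofNat d :: castL T := rfl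
    rw [h1, List.map_cons, IH]
    simp

theorem cast_toNat_map (l : List Int) (h : ∀ d ∈ l, 0 ≤ d) : castL (l.map Int.toNat) = l := by
  induction l with
  | nil => rfl
  | cons d t IH =>
    have h1 : castL ((d :: t).map Int.toNat) = Int.ofNat d.toNat :: castL (t.map Int.toNat) := rfl
    rw [h1, IH (fun x hx => h x (List.mem_cons_of_mem _ hx)), Int.ofNat_eq_natCast,
      Int.toNat_of_nonneg (h d List.mem_cons_self)]

theorem add_reverse_dRep (m : Nat) : add_reverse (dRep m) = dRep (m + revNat m) := by
  by_cases hm : m = 0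
  · subst hm; decide
  · have hmpos : 0 < m := Nat.pos_of_ne_zero hm
    have hL : Nat.digits 10 m ≠ [] := Nat.digits_ne_nil_iff_ne_zero.mpr hm
    set L := Nat.digits 10 m with hLdef
    set X := castL L with hXdef
    have hXlen : X.length = L.length := by rw [hXdef]; unfold castL; simp
    have hXne : X ≠ [] := by
      rw [hXdef]; unfold castL
      exact fun hcon => hL (List.map_eq_nil_iff.mp hcon)
    have hk : 0 < X.length := List.length_pos_iff.mpr hXne
    have hDrep : dRep m = X.reverse := by unfold dRep; rw [if_neg hm, hXdef, hLdef]
    set C := List.zipWith (· + ·) X X.reverse with hCdef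
    have hClen : C.length = X.length := by simp [hCdef]
    have hXb : ∀ x ∈ X, 0 ≤ x ∧ x ≤ 9 := by
      intro x hx
      rw [hXdef] at hx
      unfold castL at hx
      obtain ⟨d, hd, rfl⟩ := List.mem_map.mp hx
      have h9 := Nat.digits_lt_base (show 1 < 10 by norm_num) hd
      simp only [Int.ofNat_eq_natCast]
      omega
    have hCb : ∀ s ∈ C, 0 ≤ s ∧ s ≤ 18 := by
      intro s hs
      rw [hCdef, List.mem_iff_getElem] at hs
      obtain ⟨i, hi, rfl⟩ := hs
      have hiX : i < X.length := by
        have h1 := hi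
        simp only [List.length_zipWith, List.length_reverse, min_self] at h1
        exact h1
      have hiXr : i < X.reverse.length := by simpa using hiX
      rw [List.getElem_zipWith]
      have h1 := hXb _ (List.getElem_mem hiX)
      have h2 := hXb _ (List.mem_reverse.mp (List.getElem_mem hiXr))
      omega
    set cf := (carrySpec C 0).1 with hcfdef
    set out := (carrySpec C 0).2 with houtdef
    set out' := (if cf ≠ 0 then out ++ [cf] else out) with hout'
    have hred : add_reverse (dRep m) = out'.reverse := by
      rw [hDrep]
      simp only [add_reverse]
      rw [map_add_zip, List.reverse_reverse,
        show (List.zipWith (· + ·) X.reverse X).reverse = C by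
          rw [hCdef, ← List.reverse_reverse (List.zipWith (· + ·) X X.reverse),
            reverse_zipWith_add _ _ (by simp)]
          simp,
        foldl_carrySpec]
      simp [hout', ← hcfdef, ← houtdef]
    have hcf01 : 0 ≤ cf ∧ cf ≤ 1 := carrySpec_carry C hCb 0 le_rfl zero_le_one
    have hlen_out : out.length = C.length := carrySpec_length C 0
    have hvalC : valLSF C = (m : Int) + ((revNat m : Nat) : Int) := by
      rw [hCdef, valLSF_zipWith_add _ _ (by simp)]
      have e1 : valLSF X = (m : Int) := by
        rw [hXdef, valLSF_castL, hLdef, Nat.ofDigits_digits]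
      have e2 : valLSF X.reverse = ((revNat m : Nat) : Int) := by
        rw [hXdef, ← castL_reverse, valLSF_castL, hLdef]
        rfl
      rw [e1, e2]
    have hv := carrySpec_val C 0
    rw [← houtdef, ← hcfdef, hvalC, add_zero] at hv
    have hval' : valLSF out' = (m : Int) + ((revNat m : Nat) : Int) := by
      by_cases hc : cf = 0
      · rw [hout', if_neg (by simp [hc])]
        rw [hc] at hv
        simpa using hv
      · rw [hout', if_pos hc, valLSF_append_singleton, hlen_out]
        exact hv
    have hdig' : ∀ d ∈ out', 0 ≤ d ∧ d < 10 := by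
      intro d hd
      rw [hout'] at hd
      by_cases hc : cf = 0
      · rw [if_neg (by simp [hc])] at hd
        exact carrySpec_digits C 0 d hd
      · rw [if_pos hc] at hd
        rcases List.mem_append.mp hd with h | h
        · exact carrySpec_digits C 0 d h
        · simp only [List.mem_singleton] at h
          subst h
          omega
    have hlastq : ∃ u, out'.getLast? = some u ∧ 1 ≤ u := by
      by_cases hc : cf = 0
      · rcases hLrev : L.reverse with _ | ⟨d, T⟩
        · exact absurd (by simpa using congrArg List.reverse hLrev) hL
        obtain ⟨x0, X1, hX01⟩ := List.exists_cons_of_ne_nil hXne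
        have hd0 : d ≠ 0 := by
          have h2 : L.getLast? = some d := by
            rw [← List.head?_reverse, hLrev]
            rfl
          have h3 : L.getLast? = some (L.getLast hL) := List.getLast?_eq_getLast hL
          rw [h2] at h3
          rw [Option.some_inj.mp h3]
          exact Nat.getLast_digit_ne_zero 10 hm
        have hXrev : X.reverse = Int.ofNat d :: castL T := by
          rw [hXdef, ← castL_reverse, hLrev]
          rfl
        have hCrev : C.reverse = List.zipWith (· + ·) X.reverse X := by
          rw [hCdef, reverse_zipWith_add _ _ (by simp), List.reverse_reverse]
        have hClast : C.getLast? = some (Int.ofNat d + x0) := by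
          rw [← List.head?_reverse, hCrev, hXrev, hX01]
          rfl
        have hx0 : 0 ≤ x0 := (hXb x0 (by rw [hX01]; exact List.mem_cons_self)).1
        have hts : 1 ≤ Int.ofNat d + x0 := by
          rw [Int.ofNat_eq_natCast]
          omega
        obtain ⟨u, hu, hu1⟩ := carrySpec_last C (fun s hs => (hCb s hs).1) 0 le_rfl
          (by rw [← hcfdef]; exact hc) _ hClast hts
        refine ⟨u, ?_, hu1⟩
        rw [hout', if_neg (by simp [hc]), houtdef]
        exact hu
      · refine ⟨cf, ?_, by omega⟩
        rw [hout', if_pos hc]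
        exact List.getLast?_concat
    set N := out'.map Int.toNat with hN
    have hcast : castL N = out' := cast_toNat_map out' (fun d hd => (hdig' d hd).1)
    have hsum : m + revNat m ≠ 0 := by omega
    have hNlt : ∀ d ∈ N, d < 10 := by
      intro d hd
      obtain ⟨e, he, rfl⟩ := List.mem_map.mp hd
      have := hdig' e he
      omega
    have hNlast : ∀ (h : N ≠ []), N.getLast h ≠ 0 := by
      intro hne
      obtain ⟨u, hu, hu1⟩ := hlastq
      have h1 : N.getLast? = some u.toNat := by
        rw [hN, List.getLast?_map, hu]
        rfl
      have h2 : N.getLast hne = u.toNat := by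
        have h3 := List.getLast?_eq_getLast hne
        rw [h1] at h3
        exact (Option.some_inj.mp h3).symm
      omega
    have hofd : Nat.ofDigits 10 N = m + revNat m := by
      have h1 : ((Nat.ofDigits 10 N : Nat) : Int) = ((m + revNat m : Nat) : Int) := by
        rw [← valLSF_castL, hcast, hval']
        push_cast
        ring
      exact_mod_cast h1
    have hdigits : Nat.digits 10 (m + revNat m) = N := by
      rw [← hofd]
      exact Nat.digits_ofDigits 10 (by norm_num) N hNlt hNlast
    rw [hred, dRep, if_neg hsum, hdigits, hcast]

theorem pal_dRep (m : Nat) :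
    (dRep m == (dRep m).reverse) = ((m : Int) == pyRevNumLoop (m : Int) 0) := by
  by_cases hm : m = 0
  · subst hm
    rw [pyRevNumLoop_nonpos (by norm_num)]
    decide
  · have hm' : 0 < m := Nat.pos_of_ne_zero hm
    rw [pyRev_eq, Bool.eq_iff_iff]
    simp only [beq_iff_eq, dRep, hm, if_false, List.reverse_reverse]
    rw [← castL_reverse]
    constructor
    · intro h
      have hLrev : (Nat.digits 10 m).reverse = Nat.digits 10 m := by
        have h2 := congrArg (List.map Int.toNat) h
        rwa [toNat_castL, toNat_castL] at h2
      have h3 := (digits_palindrome_iff hm').mpr hLrev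
      have : revNat m = m := h3
      rw [this]
    · intro h
      have h1 : revNat m = m := by exact_mod_cast h.symm
      have h2 : (Nat.digits 10 m).reverse = Nat.digits 10 m :=
        (digits_palindrome_iff hm').mp h1
      rw [h2]

-- ===== the loop =====

theorem loops_agree : ∀ (k : Nat) (m : Nat) (it mi : Int), (mi - it).toNat = k →
    lychrelLoop (m : Int) it mi = lychrelAltLoop (dRep m) it mi := by
  intro k
  induction k with
  | zero =>
    intro m it mi hk
    have h : ¬ it < mi := by omega
    rw [lychrelLoop, lychrelAltLoop]
    simp [h, to_int_dRep]
  | succ k IH =>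
    intro m it mi hk
    have h : it < mi := by omega
    rw [lychrelLoop, lychrelAltLoop]
    simp only [h, if_pos]
    rw [reverse_number, pyRev_eq, add_reverse_dRep]
    have hcast : (m : Int) + ((revNat m : Nat) : Int) = ((m + revNat m : Nat) : Int) := by push_cast; ring
    rw [hcast, is_palindrome, ← pal_dRep]
    by_cases hp : (dRep (m + revNat m) == (dRep (m + revNat m)).reverse) = true
    · simp [hp, to_int_dRep]
    · simp only [Bool.not_eq_true] at hp
      simp only [hp, Bool.false_eq_true, if_false]
      exact IH (m + revNat m) (it + 1) mi (by omega)

-- ===== VERDICT (by name: the statement is the Claim_ definition above) =====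
theorem lychrel_test_spec : Claim_equal_lychrel_test := by
  intro n max_iterations _ hpre
  unfold Spec_lychrel_test lychrel_test lychrel_test_alt
  rw [init_digits hpre]
  have hn : ((n.toNat : Nat) : Int) = n := Int.toNat_of_nonneg hpre
  rw [← hn]
  exact loops_agree _ n.toNat 0 max_iterations rfl
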